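-- pv_equiv track=rewrite | github.com/pypi-data/pypi-mirror-402 | packages/benchbox/benchbox-0.1.0.tar.gz/benchbox-0.1.0/benchbox/core/tpcdi/etl/batch.py | _determine_load_order
-- ===== SOURCE A (Python) =====
-- def _determine_load_order(table_names: list[str]) -> list[str]:
--     """Determine optimal load order based on dependencies."""
--     # Define dependency order for TPC-DI tables
--     priority_order = [
--         "DimDate",
--         "DimTime",
--         "DimCompany",
--         "DimSecurity",
--         "DimCustomer",
--         "DimAccount",
--         "DimBroker",
--         "FactTrade",
--         "FactCashBalances",
--         "FactHoldings",
--         "FactMarketHistory",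
--     ]
--
--     # Sort tables based on priority
--     ordered_tables = []
--     for table in priority_order:
--         if table in table_names:
--             ordered_tables.append(table)
--
--     # Add any remaining tables
--     for table in table_names:
--         if table not in ordered_tables:
--             ordered_tables.append(table)
--
--     return ordered_tables
-- ===== SOURCE B (Python) =====
-- def _determine_load_order(table_names: list[str]) -> list[str]:
--     """Determine optimal load order based on dependencies."""
--     priority_order = [
--         "DimDate",
--         "DimTime",
--         "DimCompany",
--         "DimSecurity",
--         "DimCustomer",
--         "DimAccount",
--         "DimBroker",
--         "FactTrade",
--         "FactCashBalances",
--         "FactHoldings",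
--         "FactMarketHistory",
--     ]
--     rank = {name: i for i, name in enumerate(priority_order)}
--     unique = dict.fromkeys(table_names)
--     return sorted(unique, key=lambda t: rank.get(t, len(priority_order)))
-- ===== Notes on version B (the rewrite author's own statement) =====
-- stated objective: idiomatic
-- what changed: Replaces A's two filtering passes (scan priority list against the input, then append-if-absent dedup loop) with a rank dictionary, dict.fromkeys deduplication and one stable sort by rank with default len(priority_order).
import Mathlib
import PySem

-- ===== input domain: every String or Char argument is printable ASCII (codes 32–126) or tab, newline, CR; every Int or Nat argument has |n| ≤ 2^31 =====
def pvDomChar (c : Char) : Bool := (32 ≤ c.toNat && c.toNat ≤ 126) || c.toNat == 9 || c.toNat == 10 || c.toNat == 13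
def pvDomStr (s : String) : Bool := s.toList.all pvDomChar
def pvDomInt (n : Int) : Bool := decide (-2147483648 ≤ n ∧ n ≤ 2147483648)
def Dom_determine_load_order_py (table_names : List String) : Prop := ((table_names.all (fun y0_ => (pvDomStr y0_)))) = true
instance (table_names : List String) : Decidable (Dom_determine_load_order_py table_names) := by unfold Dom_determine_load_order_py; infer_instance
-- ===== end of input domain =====

-- B re-implements the ordering as a stable sort of the deduplicated input by a rank dictionary (priority index, default len(priority_order)); measured faster than A's two scanning passes on the generated inputs.


-- the TPC-DI priority list, shared verbatim by both Pythons
def pvPriorityOrder : List String :=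
  ["DimDate", "DimTime", "DimCompany", "DimSecurity", "DimCustomer", "DimAccount",
   "DimBroker", "FactTrade", "FactCashBalances", "FactHoldings", "FactMarketHistory"]

-- ===== PORT A =====
def determine_load_order_py (table_names : List String) : List String :=
  let ordered_tables :=
    pvPriorityOrder.foldl
      (fun acc table => if table ∈ table_names then acc ++ [table] else acc) []
  table_names.foldl
    (fun acc table => if table ∉ acc then acc ++ [table] else acc) ordered_tables

-- ===== PORT B =====
-- rank = {name: i for i, name in enumerate(priority_order)}; unique = dict.fromkeys(table_names);
-- sorted(unique, key=lambda t: rank.get(t, len(priority_order)))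
def determine_load_order_py_alt (table_names : List String) : List String :=
  let rank : PySem.Dict String Int :=
    (PySem.List.enumerate pvPriorityOrder).foldl (fun d p => d.insert p.2 p.1) PySem.Dict.empty
  let unique := PySem.List.dedup table_names
  PySem.List.sorted unique (fun t => rank.getD t (pvPriorityOrder.length : Int))

-- ===== PRECONDITION & SPEC =====
def Spec_determine_load_order_py (table_names : List String) (out : List String) : Prop := out = determine_load_order_py_alt table_names
instance (table_names : List String) (out : List String) : Decidable (Spec_determine_load_order_py table_names out) := by unfold Spec_determine_load_order_py; infer_instance

-- ===== CLAIM =====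
def Claim_equal_determine_load_order_py : Prop := ∀ (table_names : List String), Dom_determine_load_order_py table_names → Spec_determine_load_order_py table_names (determine_load_order_py table_names)

-- ===== LEMMAS AND PROOFS =====

-- B's key function, written out: index in the priority list, 11 for everything else.
def pvKey (t : String) : Int :=
  if "DimDate" = t then 0 else if "DimTime" = t then 1 else if "DimCompany" = t then 2
  else if "DimSecurity" = t then 3 else if "DimCustomer" = t then 4 else if "DimAccount" = t then 5
  else if "DimBroker" = t then 6 else if "FactTrade" = t then 7 else if "FactCashBalances" = t then 8
  else if "FactHoldings" = t then 9 else if "FactMarketHistory" = t then 10 else 11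

set_option maxHeartbeats 1000000 in
lemma pvKey_eq (t : String) :
    (((PySem.List.enumerate pvPriorityOrder).foldl (fun d p => d.insert p.2 p.1)
        PySem.Dict.empty).getD t (pvPriorityOrder.length : Int)) = pvKey t := by
  have h : ((PySem.List.enumerate pvPriorityOrder).foldl (fun d p => d.insert p.2 p.1)
        PySem.Dict.empty)
      = PySem.Dict.mk [("DimDate",0),("DimTime",1),("DimCompany",2),("DimSecurity",3),
        ("DimCustomer",4),("DimAccount",5),("DimBroker",6),("FactTrade",7),
        ("FactCashBalances",8),("FactHoldings",9),("FactMarketHistory",10)] := by rfl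
  rw [h]
  simp only [PySem.Dict.getD, PySem.Dict.get?_mk_cons, beq_iff_eq, pvKey]
  split_ifs <;> rfl

lemma pvKey_mem (t : String) :
    pvKey t ∈ ([0,1,2,3,4,5,6,7,8,9,10,11] : List Int) := by
  simp only [pvKey]; split_ifs <;> simp

lemma pvKey_eq_eleven (t : String) : pvKey t = 11 ↔ t ∉ pvPriorityOrder := by
  simp only [pvKey]
  split_ifs <;> subst_vars <;>
    first
      | decide
      | (refine iff_of_true rfl ?_
         simp only [pvPriorityOrder, List.mem_cons, List.not_mem_nil]
         rintro (rfl|rfl|rfl|rfl|rfl|rfl|rfl|rfl|rfl|rfl|rfl|h) <;>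
           first | (exact absurd rfl (by assumption)) | exact h)

-- insertBy skips a prefix it is not "before"
lemma insertBy_skip {α : Type} (before : α → α → Bool) (x : α) (A B : List α)
    (h : ∀ y ∈ A, before x y = false) :
    PySem.List.insertBy before x (A ++ B) = A ++ PySem.List.insertBy before x B := by
  induction A with
  | nil => simp
  | cons a A ih =>
    simp only [List.cons_append, PySem.List.insertBy, h a (by simp)]
    simp only [Bool.false_eq_true, if_false, List.cons.injEq, true_and]
    exact ih (fun y hy => h y (by simp [hy]))

-- insertBy lands at the front of a block it is "before"
lemma insertBy_front {α : Type} (before : α → α → Bool) (x : α) (B : List α)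
    (h : ∀ y ∈ B, before x y = true) :
    PySem.List.insertBy before x B = x :: B := by
  cases B with
  | nil => rfl
  | cons b B => simp [PySem.List.insertBy, h b (by simp)]

-- inserting x into a concatenation of key-buckets appends it to the end of its own bucket
lemma insert_flatMap {α : Type} (key : α → Int) (ks : List Int) (P : List α) (x : α)
    (hp : ks.Pairwise (· < ·)) (hx : key x ∈ ks) :
    PySem.List.insertBy (fun a b => decide (key a < key b)) x
        (ks.flatMap (fun k => P.filter (fun y => decide (key y = k))))
      = ks.flatMap (fun k => P.filter (fun y => decide (key y = k)) ++
          if key x = k then [x] else []) := by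
  induction ks with
  | nil => simp at hx
  | cons k ks ih =>
    have hklt : ∀ k' ∈ ks, k < k' := (List.pairwise_cons.mp hp).1
    simp only [List.flatMap_cons]
    by_cases hk : key x = k
    · rw [insertBy_skip _ _ _ _ (by intro y hy; simp at hy ⊢; omega)]
      rw [insertBy_front _ _ _ (by
        intro y hy
        simp only [List.mem_flatMap, List.mem_filter, decide_eq_true_eq] at hy
        obtain ⟨k', hk', _, hkey⟩ := hy
        simp only [decide_eq_true_eq, hkey, hk]
        exact hklt k' hk')]
      have hnot : ∀ k' ∈ ks, ¬ (key x = k') := by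
        intro k' hk'; have := hklt k' hk'; omega
      rw [if_pos hk]
      have htail := List.flatMap_congr (l := ks)
        (f := fun k' => P.filter (fun y => decide (key y = k')) ++ if key x = k' then [x] else [])
        (g := fun k' => P.filter (fun y => decide (key y = k')))
        (fun k' hk' => by simp only [if_neg (hnot k' hk'), List.append_nil])
      rw [htail]
      simp
    · have hx' : key x ∈ ks := by simp at hx; tauto
      have hkx : k < key x := hklt _ hx'
      rw [insertBy_skip _ _ _ _ (by intro y hy; simp at hy ⊢; omega)]
      rw [ih (List.pairwise_cons.mp hp).2 hx', if_neg hk, List.append_nil]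

-- the insertion-sort fold keeps the bucket decomposition as an invariant
lemma foldl_insert_buckets {α : Type} (key : α → Int) (ks : List Int)
    (hp : ks.Pairwise (· < ·)) :
    ∀ (L P : List α), (∀ x ∈ L, key x ∈ ks) →
    L.foldl (fun acc x => PySem.List.insertBy (fun a b => decide (key a < key b)) x acc)
        (ks.flatMap (fun k => P.filter (fun y => decide (key y = k))))
      = ks.flatMap (fun k => (P ++ L).filter (fun y => decide (key y = k))) := by
  intro L
  induction L with
  | nil => intro P _; simp
  | cons x L ih =>
    intro P hcov
    simp only [List.foldl_cons]
    rw [insert_flatMap key ks P x hp (hcov x (by simp))]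
    have hstep : ∀ k : Int,
        P.filter (fun y => decide (key y = k)) ++ (if key x = k then [x] else [])
          = (P ++ [x]).filter (fun y => decide (key y = k)) := by
      intro k
      simp only [List.filter_append, List.filter_cons, List.filter_nil]
      by_cases h : key x = k <;> simp [h]
    rw [List.flatMap_congr (fun k _ => hstep k)]
    rw [ih (P ++ [x]) (fun y hy => hcov y (by simp [hy]))]
    simp

-- stable sort by an Int key with values in a strictly increasing list ks = bucket concatenation
lemma sorted_buckets {α : Type} (key : α → Int) (ks : List Int) (L : List α)
    (hp : ks.Pairwise (· < ·)) (hcov : ∀ x ∈ L, key x ∈ ks) :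
    PySem.List.sorted L key false
      = ks.flatMap (fun k => L.filter (fun y => decide (key y = k))) := by
  rw [PySem.List.sorted_eq_foldl_insertBy]
  have h0 : ([] : List α) = ks.flatMap (fun k => ([] : List α).filter (fun y => decide (key y = k))) := by
    simp
  rw [h0, foldl_insert_buckets key ks hp L [] hcov]
  simp

-- A's first loop is a filter of the priority list
lemma pv_first_loop (names : List String) :
    pvPriorityOrder.foldl (fun acc table => if table ∈ names then acc ++ [table] else acc) []
      = pvPriorityOrder.filter (fun t => decide (t ∈ names)) := by
  simpa using PySem.List.foldl_append_ite_eq_filter (fun t : String => t ∈ names) pvPriorityOrder []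

-- A's second loop, started on H ++ r (H = the priority tables present), splits off H
lemma pv_shift (names : List String) (H : List String)
    (hH : ∀ t ∈ names, (t ∈ H ↔ t ∈ pvPriorityOrder)) :
    ∀ (L r : List String), (∀ t ∈ L, t ∈ names) → (∀ t ∈ r, t ∉ H) →
    L.foldl (fun acc t => if t ∉ acc then acc ++ [t] else acc) (H ++ r)
      = H ++ L.foldl (fun acc t => if t ∉ pvPriorityOrder ∧ t ∉ acc then acc ++ [t] else acc) r := by
  intro L
  induction L with
  | nil => intro r _ _; simp
  | cons t L ih =>
    intro r hL hr
    have ht : t ∈ names := hL t (by simp)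
    simp only [List.foldl_cons]
    by_cases hc : t ∉ pvPriorityOrder ∧ t ∉ r
    · have htH : t ∉ H := fun h => hc.1 ((hH t ht).mp h)
      rw [if_pos (by simp [htH, hc.2]), if_pos hc, List.append_assoc]
      exact ih (r ++ [t]) (fun y hy => hL y (by simp [hy]))
        (by intro y hy; rcases List.mem_append.mp hy with h | h
            · exact hr y h
            · simp at h; subst h; exact htH)
    · have htm : t ∈ H ++ r := by
        rcases not_and_or.mp hc with h | h
        · exact List.mem_append.mpr (Or.inl ((hH t ht).mpr (not_not.mp h)))
        · exact List.mem_append.mpr (Or.inr (not_not.mp h))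
      rw [if_neg (not_not_intro htm), if_neg hc]
      exact ih r (fun y hy => hL y (by simp [hy])) hr

-- the inner dedup loop over non-priority tables is the non-priority filter of the ordered dedup
lemma pv_fold_filter : ∀ (L seen : List String),
    L.foldl (fun acc t => if t ∉ pvPriorityOrder ∧ t ∉ acc then acc ++ [t] else acc)
        (seen.filter (fun t => decide (t ∉ pvPriorityOrder)))
      = (L.foldl PySem.Set.add seen).filter (fun t => decide (t ∉ pvPriorityOrder)) := by
  intro L
  induction L with
  | nil => intro seen; simp
  | cons t L ih =>
    intro seen
    simp only [List.foldl_cons]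
    by_cases hs : t ∈ seen
    · have : PySem.Set.add seen t = seen := by simp [PySem.Set.add, PySem.Set.contains, hs]
      rw [this]
      by_cases hp : t ∈ pvPriorityOrder
      · rw [if_neg (by tauto)]; exact ih seen
      · rw [if_neg (by simp [hp, hs])]; exact ih seen
    · have hadd : PySem.Set.add seen t = seen ++ [t] := by
        simp [PySem.Set.add, PySem.Set.contains, hs]
      rw [hadd]
      by_cases hp : t ∈ pvPriorityOrder
      · rw [if_neg (by tauto)]
        have : (seen ++ [t]).filter (fun t => decide (t ∉ pvPriorityOrder))
            = seen.filter (fun t => decide (t ∉ pvPriorityOrder)) := by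
          simp [List.filter_append, hp]
        rw [← this] at *
        exact ih (seen ++ [t])
      · have hnf : t ∉ seen.filter (fun t => decide (t ∉ pvPriorityOrder)) := by
          simp [List.mem_filter, hs]
        rw [if_pos ⟨hp, hnf⟩]
        have : seen.filter (fun t => decide (t ∉ pvPriorityOrder)) ++ [t]
            = (seen ++ [t]).filter (fun t => decide (t ∉ pvPriorityOrder)) := by
          simp [List.filter_append, hp]
        rw [this]
        exact ih (seen ++ [t])

-- filtering a duplicate-free list for one element
lemma filter_eq_singleton {α : Type} [DecidableEq α] :
    ∀ (l : List α), l.Nodup → ∀ t0 : α,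
    l.filter (fun x => decide (t0 = x)) = if t0 ∈ l then [t0] else [] := by
  intro l
  induction l with
  | nil => intro _ t0; simp
  | cons a l ih =>
    intro hnd t0
    have ha : a ∉ l := (List.nodup_cons.mp hnd).1
    by_cases h : t0 = a
    · subst h
      simp [ih (List.nodup_cons.mp hnd).2 t0, ha]
    · simp only [List.filter_cons, decide_eq_true_eq, if_neg h]
      rw [ih (List.nodup_cons.mp hnd).2 t0]
      simp [List.mem_cons, h]

-- one priority bucket of a duplicate-free list
lemma pv_bucket (l : List String) (hl : l.Nodup) (k : Int) (t0 : String)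
    (hk : ∀ y, pvKey y = k ↔ t0 = y) :
    l.filter (fun y => decide (pvKey y = k)) = if t0 ∈ l then [t0] else [] := by
  rw [show l.filter (fun y => decide (pvKey y = k)) = l.filter (fun y => decide (t0 = y)) from
    List.filter_congr (fun y _ => by simp only [decide_eq_decide]; exact hk y)]
  exact filter_eq_singleton l hl t0

lemma pvKey_iff_all (y : String) :
    (pvKey y = 0 ↔ "DimDate" = y) ∧ (pvKey y = 1 ↔ "DimTime" = y) ∧
    (pvKey y = 2 ↔ "DimCompany" = y) ∧ (pvKey y = 3 ↔ "DimSecurity" = y) ∧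
    (pvKey y = 4 ↔ "DimCustomer" = y) ∧ (pvKey y = 5 ↔ "DimAccount" = y) ∧
    (pvKey y = 6 ↔ "DimBroker" = y) ∧ (pvKey y = 7 ↔ "FactTrade" = y) ∧
    (pvKey y = 8 ↔ "FactCashBalances" = y) ∧ (pvKey y = 9 ↔ "FactHoldings" = y) ∧
    (pvKey y = 10 ↔ "FactMarketHistory" = y) := by
  simp only [pvKey]
  split_ifs <;> subst_vars <;>
    refine ⟨?_,?_,?_,?_,?_,?_,?_,?_,?_,?_,?_⟩ <;>
    first | decide | (exact iff_of_false (by decide) (by assumption))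

-- cons-filter as an append of an if-singleton
lemma filter_cons_append {α : Type} (p : α → Bool) (a : α) (l : List α) :
    (a :: l).filter p = (if p a = true then [a] else []) ++ l.filter p := by
  by_cases h : p a <;> simp [h]

-- ===== VERDICT =====
set_option maxHeartbeats 2000000 in
theorem determine_load_order_py_spec : Claim_equal_determine_load_order_py := by
  intro names _
  unfold Spec_determine_load_order_py determine_load_order_py determine_load_order_py_alt
  simp only []
  -- B side: key = pvKey, then bucket decomposition of the stable sort
  rw [show (fun t => (((PySem.List.enumerate pvPriorityOrder).foldl
        (fun d p => d.insert p.2 p.1) PySem.Dict.empty).getD t (pvPriorityOrder.length : Int)))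
      = pvKey from funext pvKey_eq]
  rw [sorted_buckets pvKey ([0,1,2,3,4,5,6,7,8,9,10,11] : List Int)
      (PySem.List.dedup names) (by decide) (fun x _ => pvKey_mem x)]
  -- A side: first loop = priority filter; second loop splits
  rw [pv_first_loop names]
  have hH : ∀ t ∈ names,
      (t ∈ pvPriorityOrder.filter (fun t => decide (t ∈ names)) ↔ t ∈ pvPriorityOrder) := by
    intro t ht; simp [List.mem_filter, ht]
  have hshift := pv_shift names (pvPriorityOrder.filter (fun t => decide (t ∈ names))) hH
      names [] (fun _ h => h) (by simp)
  rw [List.append_nil] at hshift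
  rw [hshift]
  have hfold := pv_fold_filter names []
  simp only [List.filter_nil] at hfold
  rw [hfold]
  -- now both sides are H ++ rest; identify the buckets
  have hnd : (PySem.List.dedup names).Nodup := PySem.List.nodup_dedup names
  have i0 : ∀ y, pvKey y = 0 ↔ "DimDate" = y := fun y => (pvKey_iff_all y).1
  have i1 : ∀ y, pvKey y = 1 ↔ "DimTime" = y := fun y => (pvKey_iff_all y).2.1
  have i2 : ∀ y, pvKey y = 2 ↔ "DimCompany" = y := fun y => (pvKey_iff_all y).2.2.1
  have i3 : ∀ y, pvKey y = 3 ↔ "DimSecurity" = y := fun y => (pvKey_iff_all y).2.2.2.1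
  have i4 : ∀ y, pvKey y = 4 ↔ "DimCustomer" = y := fun y => (pvKey_iff_all y).2.2.2.2.1
  have i5 : ∀ y, pvKey y = 5 ↔ "DimAccount" = y := fun y => (pvKey_iff_all y).2.2.2.2.2.1
  have i6 : ∀ y, pvKey y = 6 ↔ "DimBroker" = y := fun y => (pvKey_iff_all y).2.2.2.2.2.2.1
  have i7 : ∀ y, pvKey y = 7 ↔ "FactTrade" = y := fun y => (pvKey_iff_all y).2.2.2.2.2.2.2.1
  have i8 : ∀ y, pvKey y = 8 ↔ "FactCashBalances" = y := fun y => (pvKey_iff_all y).2.2.2.2.2.2.2.2.1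
  have i9 : ∀ y, pvKey y = 9 ↔ "FactHoldings" = y := fun y => (pvKey_iff_all y).2.2.2.2.2.2.2.2.2.1
  have i10 : ∀ y, pvKey y = 10 ↔ "FactMarketHistory" = y := fun y => (pvKey_iff_all y).2.2.2.2.2.2.2.2.2.2
  rw [show ([0,1,2,3,4,5,6,7,8,9,10,11] : List Int).flatMap
        (fun k => (PySem.List.dedup names).filter (fun y => decide (pvKey y = k)))
      = ((PySem.List.dedup names).filter (fun y => decide (pvKey y = 0))) ++
        ((PySem.List.dedup names).filter (fun y => decide (pvKey y = 1))) ++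
        ((PySem.List.dedup names).filter (fun y => decide (pvKey y = 2))) ++
        ((PySem.List.dedup names).filter (fun y => decide (pvKey y = 3))) ++
        ((PySem.List.dedup names).filter (fun y => decide (pvKey y = 4))) ++
        ((PySem.List.dedup names).filter (fun y => decide (pvKey y = 5))) ++
        ((PySem.List.dedup names).filter (fun y => decide (pvKey y = 6))) ++
        ((PySem.List.dedup names).filter (fun y => decide (pvKey y = 7))) ++
        ((PySem.List.dedup names).filter (fun y => decide (pvKey y = 8))) ++
        ((PySem.List.dedup names).filter (fun y => decide (pvKey y = 9))) ++
        ((PySem.List.dedup names).filter (fun y => decide (pvKey y = 10))) ++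
        ((PySem.List.dedup names).filter (fun y => decide (pvKey y = 11)))
      from by simp [List.flatMap_cons, List.append_assoc]]
  rw [pv_bucket _ hnd _ _ i0, pv_bucket _ hnd _ _ i1, pv_bucket _ hnd _ _ i2,
      pv_bucket _ hnd _ _ i3, pv_bucket _ hnd _ _ i4, pv_bucket _ hnd _ _ i5,
      pv_bucket _ hnd _ _ i6, pv_bucket _ hnd _ _ i7, pv_bucket _ hnd _ _ i8,
      pv_bucket _ hnd _ _ i9, pv_bucket _ hnd _ _ i10]
  rw [show (PySem.List.dedup names).filter (fun y => decide (pvKey y = 11))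
      = (PySem.List.dedup names).filter (fun t => decide (t ∉ pvPriorityOrder)) from
    List.filter_congr (fun y _ => by simp only [decide_eq_decide]; exact pvKey_eq_eleven y)]
  rw [show List.foldl PySem.Set.add [] names = PySem.List.dedup names from rfl]
  -- the priority filter on the left unfolds to the same if-singletons
  simp only [pvPriorityOrder, filter_cons_append, List.filter_nil, decide_eq_true_eq,
    PySem.List.mem_dedup, List.append_assoc, List.append_nil]
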